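-- pv_equiv track=rewrite | github.com/wojciech-gancza/meth | source/tools.py | _create_selection_map_at_char
-- ===== SOURCE A (Python) =====
-- def _create_selection_map_at_char(values, position):
--     result_map = { }
--     for value in values:
--         key = "'" + value[position] + "'"
--         if key in result_map.keys():
--             result_map[key].append(value)
--         else:
--             result_map[key] = [ value ]
--     return result_map
-- ===== SOURCE B (Python) =====
-- def _create_selection_map_at_char(values, position):
--     keys = ["'" + value[position] + "'" for value in values]
--     return {k: [v for v, kv in zip(values, keys) if kv == k]
--             for k in dict.fromkeys(keys)}
-- ===== Notes on version B (the rewrite author's own statement) =====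
-- stated objective: alternative
-- what changed: Replaces the single-pass dict-mutation loop by a two-pass dict comprehension: compute all keys once, dedup them in first-appearance order with dict.fromkeys, and build each group by filtering the zipped (value, key) list.
import Mathlib
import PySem

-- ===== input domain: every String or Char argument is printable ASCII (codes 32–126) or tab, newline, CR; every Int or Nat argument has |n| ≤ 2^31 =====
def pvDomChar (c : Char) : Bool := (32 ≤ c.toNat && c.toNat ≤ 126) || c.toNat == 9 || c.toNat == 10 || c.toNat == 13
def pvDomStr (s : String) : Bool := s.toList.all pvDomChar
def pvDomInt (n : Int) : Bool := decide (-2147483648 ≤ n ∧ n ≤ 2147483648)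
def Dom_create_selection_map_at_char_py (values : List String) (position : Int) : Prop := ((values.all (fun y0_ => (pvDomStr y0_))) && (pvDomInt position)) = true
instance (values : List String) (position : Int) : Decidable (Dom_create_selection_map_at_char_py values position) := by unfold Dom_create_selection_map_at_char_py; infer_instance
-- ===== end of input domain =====

-- B replaces A's single-pass dict-mutation loop by a two-pass dict comprehension
-- (dedup keys in first-appearance order, then filter a group per key); not faster, alternative.

-- key = "'" + value[position] + "'"; the getD default is only reached outside Pre_
-- (where the Python raises IndexError); built via String.mk, exact on the admitted domain.
def pvKey (value : String) (position : Int) : String :=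
  String.ofList ['\'', (PySem.Str.pyGet? value position).getD ' ', '\'']

-- ===== PORT A =====
def create_selection_map_at_char_py (values : List String) (position : Int) : List (String × List String) :=
  (values.foldl (fun d value =>
      let key := pvKey value position
      if d.contains key then d.modify key [] (fun l => l ++ [value])
      else d.insert key [value])
    PySem.Dict.empty).items

-- ===== PORT B =====
def create_selection_map_at_char_py_alt (values : List String) (position : Int) : List (String × List String) :=
  let keys := values.map (fun value => pvKey value position)
  (PySem.List.dedup keys).map (fun k =>
    (k, ((values.zip keys).filter (fun p => p.2 == k)).map (fun p => p.1)))

-- ===== PRECONDITION & SPEC =====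
-- Pre_ excludes exactly the inputs where value[position] raises IndexError (both A and B raise there).
def Pre_create_selection_map_at_char_py (values : List String) (position : Int) : Prop :=
  ∀ v ∈ values, PySem.Raise.InRange v.toList.length position
instance (values : List String) (position : Int) : Decidable (Pre_create_selection_map_at_char_py values position) := by unfold Pre_create_selection_map_at_char_py; infer_instance

def pvWitness_create_selection_map_at_char_py : List String × Int := (["ab", "cb", "ax"], 0)

def Spec_create_selection_map_at_char_py (values : List String) (position : Int) (out : List (String × List String)) : Prop := out = create_selection_map_at_char_py_alt values position
instance (values : List String) (position : Int) (out : List (String × List String)) : Decidable (Spec_create_selection_map_at_char_py values position out) := by unfold Spec_create_selection_map_at_char_py; infer_instance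

-- ===== CLAIM (what is proved, stated in full; the proofs are below) =====
def Claim_equal_create_selection_map_at_char_py : Prop := ∀ (values : List String) (position : Int), Dom_create_selection_map_at_char_py values position → Pre_create_selection_map_at_char_py values position → Spec_create_selection_map_at_char_py values position (create_selection_map_at_char_py values position)

-- ===== LEMMAS AND PROOFS =====

-- A's if/contains branch is exactly Dict.modify with default []
theorem pv_step_eq_modify (d : PySem.Dict String (List String)) (k v : String) :
    (if d.contains k then d.modify k [] (fun l => l ++ [v]) else d.insert k [v])
      = d.modify k [] (fun l => l ++ [v]) := by
  by_cases h : d.contains k = true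
  · simp [h]
  · simp only [Bool.not_eq_true] at h
    simp [h, PySem.Dict.modify, PySem.Dict.getD_of_not_contains d [] h]

theorem pv_zip_filter (values : List String) (K : String → String) (k : String) :
    (((values.zip (values.map K)).filter (fun p => p.2 == k)).map (fun p => p.1))
      = (((values.map (fun v => (K v, v))).filter (fun p => p.1 == k)).map (fun p => p.2)) := by
  induction values with
  | nil => rfl
  | cons v vs ih =>
    simp only [List.map_cons, List.zip_cons_cons, List.filter_cons]
    by_cases h : (K v == k) = true
    · simp [h, ih]
    · simp [h, ih]

-- ===== VERDICT (by name: the statement is the Claim_ definition above) =====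
theorem create_selection_map_at_char_py_spec : Claim_equal_create_selection_map_at_char_py := by
  intro values position _ _
  unfold Spec_create_selection_map_at_char_py
  unfold create_selection_map_at_char_py create_selection_map_at_char_py_alt
  simp only [pv_step_eq_modify]
  have hfold :
      values.foldl (fun d value => d.modify (pvKey value position) [] (fun l => l ++ [value]))
          PySem.Dict.empty
        = (values.map (fun v => (pvKey v position, v))).foldl
            (fun d p => d.modify p.1 [] (fun l => l ++ [p.2])) PySem.Dict.empty := by
    rw [List.foldl_map]
  rw [hfold]
  set l := values.map (fun v => (pvKey v position, v)) with hl
  have hnodup : ((l.foldl (fun d p => d.modify p.1 [] (fun l => l ++ [p.2]))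
      PySem.Dict.empty)).keys.Nodup := by
    exact PySem.Dict.nodup_keys_foldl_modify_key l (fun p => p.1) []
      (fun d p => fun s => s ++ [p.2]) PySem.Dict.empty (by simp)
  rw [PySem.Dict.items_eq_map_keys _ hnodup []]
  have hkeys : ((l.foldl (fun d p => d.modify p.1 [] (fun l => l ++ [p.2]))
      PySem.Dict.empty)).keys = PySem.List.dedup (values.map (fun v => pvKey v position)) := by
    rw [PySem.Dict.keys_foldl_modify_key l (fun p => p.1) [] (fun d p => fun s => s ++ [p.2])]
    simp [hl, PySem.Set.update_nil_left, List.map_map, Function.comp_def]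
  rw [hkeys]
  apply List.map_congr_left
  intro k _
  have hget := PySem.Dict.getD_foldl_modify_append l PySem.Dict.empty k
  simp only [PySem.Dict.getD_empty, List.nil_append] at hget
  rw [hget, pv_zip_filter values (fun v => pvKey v position) k]
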